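-- pv_equiv track=rewrite | github.com/OluyomiKay/AWS-learning | Python Challenge/Solution/algorithms.py | maskbinary
-- ===== SOURCE A (Python) =====
-- def maskbinary(flatlist,n):
--     i = 0
--     while i < len(flatlist):
--         if i <= n:
--             flatlist[i] = 1
--         else:
--             flatlist[i] = 0
--         i +=1
--     return flatlist
-- ===== SOURCE B (Python) =====
-- def maskbinary(flatlist, n):
--     # two contiguous run-fills instead of a per-index conditional loop;
--     # mutates flatlist in place like A does
--     cut = min(len(flatlist), max(0, n + 1))
--     flatlist[:cut] = [1] * cut
--     flatlist[cut:] = [0] * (len(flatlist) - cut)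
--     return flatlist
-- ===== Notes on version B (the rewrite author's own statement) =====
-- stated objective: simpler
-- what changed: Replaces the per-index while loop with a branch test by one clamp computation cut = min(len, max(0, n+1)) and two contiguous block fills (replicate 1s then 0s).
import Mathlib
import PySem

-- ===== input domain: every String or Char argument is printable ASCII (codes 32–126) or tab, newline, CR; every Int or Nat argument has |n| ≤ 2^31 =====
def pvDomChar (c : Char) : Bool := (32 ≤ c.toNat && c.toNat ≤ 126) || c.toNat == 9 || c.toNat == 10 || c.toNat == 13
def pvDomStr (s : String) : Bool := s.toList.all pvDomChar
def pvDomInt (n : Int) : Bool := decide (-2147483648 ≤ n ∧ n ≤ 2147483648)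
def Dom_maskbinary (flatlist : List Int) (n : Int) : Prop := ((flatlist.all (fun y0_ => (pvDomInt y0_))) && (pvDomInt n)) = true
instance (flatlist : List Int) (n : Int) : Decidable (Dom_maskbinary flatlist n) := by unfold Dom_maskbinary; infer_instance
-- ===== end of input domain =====

-- B replaces A's per-index conditional while loop by one clamp (cut) and two block
-- fills; equally fast, simpler. Both Pythons mutate flatlist in place identically;
-- the equivalence proved here is about the return value.


-- ===== PORT A =====
-- while i < len(flatlist): write 1 if i <= n else 0 at index i; i += 1
def maskbinaryLoop (flatlist : List Int) (n : Int) (i : Nat) : List Int :=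
  if _h : i < flatlist.length then
    maskbinaryLoop (flatlist.set i (if (i : Int) ≤ n then 1 else 0)) n (i + 1)
  else
    flatlist
termination_by flatlist.length - i
decreasing_by simp [List.length_set]; omega

def maskbinary (flatlist : List Int) (n : Int) : List Int :=
  maskbinaryLoop flatlist n 0

-- ===== PORT B =====
-- cut = min(len, max(0, n+1)); [1]*cut ++ [0]*(len-cut)
def maskbinary_alt (flatlist : List Int) (n : Int) : List Int :=
  let cut : Nat := min flatlist.length (max 0 (n + 1)).toNat
  List.replicate cut 1 ++ List.replicate (flatlist.length - cut) 0

-- ===== PRECONDITION & SPEC =====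
def Spec_maskbinary (flatlist : List Int) (n : Int) (out : List Int) : Prop := out = maskbinary_alt flatlist n
instance (flatlist : List Int) (n : Int) (out : List Int) : Decidable (Spec_maskbinary flatlist n out) := by unfold Spec_maskbinary; infer_instance

-- ===== CLAIM (what is proved, stated in full; the proofs are below) =====
def Claim_equal_maskbinary : Prop := ∀ (flatlist : List Int) (n : Int), Dom_maskbinary flatlist n → Spec_maskbinary flatlist n (maskbinary flatlist n)

-- ===== LEMMAS AND PROOFS =====

-- setting index i then taking i+1 elements appends the new value to the untouched prefix
theorem take_succ_set (l : List Int) (i : Nat) (v : Int) (h : i < l.length) :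
    (l.set i v).take (i + 1) = l.take i ++ [v] := by
  rw [List.set_eq_take_cons_drop v h, List.take_append]
  have hlen : (l.take i).length = i := by simp; omega
  rw [List.take_of_length_le (by omega), hlen]
  simp

-- the loop leaves the first i elements alone and overwrites the suffix with the mask
theorem maskbinaryLoop_eq (n : Int) (l : List Int) (i : Nat) :
    maskbinaryLoop l n i =
      l.take i ++ (List.range' i (l.length - i)).map
        (fun (j : Nat) => if (j : Int) <= n then (1 : Int) else 0) := by
  by_cases h : i < l.length
  · rw [maskbinaryLoop, dif_pos h,
      maskbinaryLoop_eq n (l.set i (if (i : Int) <= n then 1 else 0)) (i + 1)]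
    rw [List.length_set, take_succ_set l i _ h]
    have hr : l.length - i = (l.length - (i + 1)) + 1 := by omega
    rw [hr, List.range'_succ, List.map_cons, List.append_assoc]
    rfl
  · rw [maskbinaryLoop, dif_neg h]
    have h0 : l.length - i = 0 := by omega
    simp [h0, List.take_of_length_le (by omega : l.length <= i)]
termination_by l.length - i
decreasing_by simp [List.length_set]; omega

-- ===== VERDICT (by name: the statement is the Claim_ definition above) =====
theorem maskbinary_spec : Claim_equal_maskbinary := by
  intro l n _
  unfold Spec_maskbinary maskbinary maskbinary_alt
  rw [maskbinaryLoop_eq]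
  simp only [List.take_zero, List.nil_append, Nat.sub_zero]
  set cut : Nat := min l.length (max 0 (n + 1)).toNat with hcut
  have hcle : cut <= l.length := min_le_left _ _
  apply List.ext_getElem
  · simp only [List.length_map, List.length_range', List.length_append,
      List.length_replicate]
    omega
  · intro j hj hj'
    have hjl : j < l.length := by simpa using hj
    rw [List.getElem_map, List.getElem_range']
    rcases Nat.lt_or_ge j cut with hlt | hge
    · rw [List.getElem_append_left (by simpa using hlt), List.getElem_replicate]
      have : ((j : Nat) : Int) <= n := by
        have : j < (max 0 (n + 1)).toNat := lt_of_lt_of_le hlt (by omega)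
        omega
      simp [this]
    · rw [List.getElem_append_right (by simpa using hge), List.getElem_replicate]
      have : ¬ ((j : Nat) : Int) <= n := by
        have : (max 0 (n + 1)).toNat <= j := by omega
        omega
      simp [this]
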